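-- pv_equiv track=rewrite | github.com/Lee-Kyuhwun/Baekjoon_Pratice | 프로그래머스/lv0/120812. 최빈값 구하기/최빈값 구하기.py | solution
-- ===== SOURCE A (Python) =====
-- def solution(array):
--     count_dict={}
--     for num in array:
--         if num not in count_dict:
--             count_dict[num] = 1
--         else:
--             count_dict[num] +=1
--
--     max_count = max(count_dict.values())
--     modes =[k for k,v in count_dict.items() if v == max_count]
--
--     if len(modes)> 1:
--         return -1
--     else:
--         return modes[0]
-- ===== SOURCE B (Python) =====
-- def solution(array):
--     runs = []
--     for x in sorted(array):
--         if runs and runs[-1][0] == x: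
--             runs[-1] = (x, runs[-1][1] + 1)
--         else:
--             runs.append((x, 1))
--     best_val = best_cnt = ties = 0
--     for v, c in runs:
--         if c > best_cnt:
--             best_val, best_cnt, ties = v, c, 1
--         elif c == best_cnt:
--             ties += 1
--     return best_val if ties == 1 else -1
-- ===== Notes on version B (the rewrite author's own statement) =====
-- stated objective: alternative
-- what changed: Replaces the dict-counting loop plus max-of-values plus filter-comprehension passes by sorting the array, run-length-encoding it in one scan, and an argmax-with-tie-count scan over the runs.
import Mathlib
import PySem

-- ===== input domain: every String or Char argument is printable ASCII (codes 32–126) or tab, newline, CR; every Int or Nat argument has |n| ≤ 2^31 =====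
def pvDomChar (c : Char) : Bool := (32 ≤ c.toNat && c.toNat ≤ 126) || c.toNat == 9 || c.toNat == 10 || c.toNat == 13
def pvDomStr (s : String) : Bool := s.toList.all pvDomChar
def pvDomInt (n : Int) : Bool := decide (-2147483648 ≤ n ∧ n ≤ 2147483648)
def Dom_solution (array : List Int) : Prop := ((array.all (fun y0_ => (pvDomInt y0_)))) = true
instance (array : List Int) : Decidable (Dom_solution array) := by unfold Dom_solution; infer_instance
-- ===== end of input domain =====

-- B replaces A's dict-count + max + filter passes by one argmax-with-tie-count scan
-- over the sorted distinct values (objective: alternative; not claimed faster).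

-- B replaces A's dict-count + max-of-values + filter-comprehension passes by a sort of the
-- array followed by a run-length scan and an argmax-with-tie-count scan over the runs
-- (objective: alternative; not claimed faster).

-- ===== PORT A =====
def solution (array : List Int) : Int :=
  let count_dict := array.foldl
    (fun (d : PySem.Dict Int Int) num =>
      if !d.contains num then d.insert num 1
      else d.insert num (d.getD num 0 + 1))
    PySem.Dict.empty
  -- Python raises ValueError here when count_dict is empty (array = []); Pre_ excludes that,
  -- the .getD 0 default is never reached inside Pre_.
  let max_count := (PySem.List.max? count_dict.values (fun x => x)).getD 0
  let modes := (count_dict.items.filter (fun p => p.2 == max_count)).map (fun p => p.1)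
  if (modes.length : Int) > 1 then -1
  else (PySem.List.pyGet? modes 0).getD 0

-- ===== PORT B =====
-- B-side helpers: the two loop bodies of Source B, named so the proofs can speak about them
-- (rstep = the body of B's first loop: extend or open the current run of the sorted scan)
def rstep (acc : List (Int × Int)) (x : Int) : List (Int × Int) :=
  match acc.getLast? with
  | some (v, c) => if v == x then acc.dropLast ++ [(x, c + 1)] else acc ++ [(x, 1)]
  | none => acc ++ [(x, 1)]

-- (bstep = the body of B's second loop: best value / best count / number of tying values)
def bstep (s : Int × Int × Int) (p : Int × Int) : Int × Int × Int :=
  if p.2 > s.2.1 then (p.1, p.2, 1)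
  else if p.2 = s.2.1 then (s.1, s.2.1, s.2.2 + 1)
  else s

def solution_alt (array : List Int) : Int :=
  let runs := (PySem.List.sorted array (fun x => x) false).foldl rstep []
  let r := runs.foldl bstep (0, 0, 0)
  if r.2.2 = 1 then r.1 else -1

-- ===== PRECONDITION & SPEC =====
-- Pre_ excludes only the empty list, on which A raises ValueError (max of an empty sequence);
-- B returns -1 there.
def Pre_solution (array : List Int) : Prop := array ≠ []
instance (array : List Int) : Decidable (Pre_solution array) := by unfold Pre_solution; infer_instance
def pvWitness_solution : List Int := ([1, 2, 2])

def Spec_solution (array : List Int) (out : Int) : Prop := out = solution_alt array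
instance (array : List Int) (out : Int) : Decidable (Spec_solution array out) := by unfold Spec_solution; infer_instance

-- ===== CLAIM (what is proved, stated in full; the proofs are below) =====
def Claim_equal_solution : Prop := ∀ (array : List Int), Dom_solution array → Pre_solution array → Spec_solution array (solution array)

-- ===== LEMMAS AND PROOFS =====

def ddm (ws : List Int) (v : Int) : List Int :=
  (PySem.Set.ofList ws).filter (fun u => u ≠ v)

theorem mem_ddm (ws : List Int) (v u : Int) : u ∈ ddm ws v ↔ u ∈ ws ∧ u ≠ v := by
  simp [ddm, List.mem_filter, PySem.Set.mem_ofList]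

theorem nodup_ddm (ws : List Int) (v : Int) : (ddm ws v).Nodup :=
  (PySem.Set.nodup_ofList ws).filter _

theorem rfold_perm : ∀ (ws : List Int) (v c : Int) (r : List (Int × Int)),
    ws.Pairwise (· ≤ ·) → (∀ u ∈ ws, v ≤ u) →
    (ws.foldl rstep (r ++ [(v, c)])).Perm
      (r ++ (v, c + (ws.count v : Int)) ::
        (ddm ws v).map (fun u => (u, (ws.count u : Int)))) := by
  intro ws
  induction ws with
  | nil => intro v c r _ _; simp [ddm]
  | cons x tl ih =>
    intro v c r hpw hlb
    have hpw' : tl.Pairwise (· ≤ ·) := hpw.of_cons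
    have hx : ∀ u ∈ tl, x ≤ u := fun u hu => (List.pairwise_cons.mp hpw).1 u hu
    by_cases hxv : x = v
    · subst hxv
      have hstep : rstep (r ++ [(x, c)]) x = r ++ [(x, c + 1)] := by
        simp [rstep]
      rw [List.foldl_cons, hstep]
      refine (ih x (c + 1) r hpw' hx).trans ?_
      refine List.Perm.append_left r ?_
      have hcnt : c + 1 + (tl.count x : Int) = c + ((x :: tl).count x : Int) := by
        rw [List.count_cons_self]; push_cast; ring
      rw [hcnt]
      refine List.Perm.cons _ ?_
      have hdd : (ddm tl x).Perm (ddm (x :: tl) x) := by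
        rw [List.perm_ext_iff_of_nodup (nodup_ddm ..) (nodup_ddm ..)]
        intro u
        constructor
        · intro hu
          obtain ⟨hu, hne⟩ := (mem_ddm ..).mp hu
          exact (mem_ddm ..).mpr ⟨List.mem_cons.mpr (Or.inr hu), hne⟩
        · intro hu
          obtain ⟨hu, hne⟩ := (mem_ddm ..).mp hu
          rcases List.mem_cons.mp hu with h | h
          · exact absurd h hne
          · exact (mem_ddm ..).mpr ⟨h, hne⟩
      have hmapeq : (ddm tl x).map (fun u => (u, (tl.count u : Int)))
          = (ddm tl x).map (fun u => (u, ((x :: tl).count u : Int))) :=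
        List.map_congr_left (fun u hu => by
          simp [Ne.symm ((mem_ddm ..).mp hu).2])
      rw [hmapeq]
      exact hdd.map _
    · have hvx : v < x := lt_of_le_of_ne (hlb x (by simp)) (fun h => hxv h.symm)
      have hstep : rstep (r ++ [(v, c)]) x = (r ++ [(v, c)]) ++ [(x, 1)] := by
        simp [rstep, Ne.symm hxv]
      rw [List.foldl_cons, hstep]
      refine (ih x 1 (r ++ [(v, c)]) hpw' hx).trans ?_
      have hvnot : ∀ u ∈ x :: tl, v < u := by
        intro u hu
        rcases List.mem_cons.mp hu with h | h
        · exact h ▸ hvx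
        · exact lt_of_lt_of_le hvx (hx u h)
      have hv0 : (((x :: tl).count v : Nat) : Int) = 0 := by
        have : v ∉ x :: tl := fun h => lt_irrefl v (hvnot v h)
        simp [List.count_eq_zero_of_not_mem this]
      rw [List.append_assoc, List.singleton_append]
      refine List.Perm.append_left r ?_
      rw [hv0, add_zero]
      have hdd : (ddm (x :: tl) v).Perm (x :: ddm tl x) := by
        rw [List.perm_ext_iff_of_nodup (nodup_ddm ..) (by
          refine List.nodup_cons.mpr ⟨fun h => ((mem_ddm ..).mp h).2 rfl, nodup_ddm ..⟩)]
        intro u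
        constructor
        · intro hu
          obtain ⟨hu, hne⟩ := (mem_ddm ..).mp hu
          rcases List.mem_cons.mp hu with h | h
          · exact List.mem_cons.mpr (Or.inl h)
          · by_cases hux : u = x
            · exact List.mem_cons.mpr (Or.inl hux)
            · exact List.mem_cons.mpr (Or.inr ((mem_ddm ..).mpr ⟨h, hux⟩))
        · intro hu
          rcases List.mem_cons.mp hu with h | h
          · subst h
            exact (mem_ddm ..).mpr ⟨List.mem_cons_self .., ne_of_gt hvx⟩
          · obtain ⟨h1, h2⟩ := (mem_ddm ..).mp h
            exact (mem_ddm ..).mpr ⟨List.mem_cons.mpr (Or.inr h1),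
              ne_of_gt (hvnot u (List.mem_cons.mpr (Or.inr h1)))⟩
      have hxc : (1 : Int) + (tl.count x : Int) = ((x :: tl).count x : Int) := by
        rw [List.count_cons_self]; push_cast; ring
      have hmapeq : (ddm tl x).map (fun u => (u, (tl.count u : Int)))
          = (ddm tl x).map (fun u => (u, ((x :: tl).count u : Int))) :=
        List.map_congr_left (fun u hu => by
          simp [Ne.symm ((mem_ddm ..).mp hu).2])
      rw [hxc, hmapeq]
      refine List.Perm.cons _ ?_
      simpa using (hdd.map (fun u => (u, ((x :: tl).count u : Int)))).symm

theorem bfold_flat (ps : List (Int × Int)) (bv bc t : Int)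
    (hub : ∀ p ∈ ps, p.2 ≤ bc) :
    ps.foldl bstep (bv, bc, t)
      = (bv, bc, t + (ps.countP (fun p => p.2 == bc) : Int)) := by
  induction ps generalizing t with
  | nil => simp
  | cons p tl ih =>
    have hv := hub p (by simp)
    by_cases he : p.2 = bc
    · simp only [List.foldl_cons, bstep, he, lt_irrefl, if_false, if_true]
      rw [ih (t + 1) (fun w hw => hub w (by simp [hw]))]
      simp [he]
      ring
    · have hlt : p.2 < bc := lt_of_le_of_ne hv he
      simp only [List.foldl_cons, bstep]
      rw [if_neg (by omega), if_neg he]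
      rw [ih t (fun w hw => hub w (by simp [hw]))]
      simp [he]

theorem bfold_mode (ps : List (Int × Int)) (M : Int)
    (hmem : ∃ p ∈ ps, p.2 = M)
    (hub : ∀ p ∈ ps, p.2 ≤ M) :
    ∀ bv bc t, bc < M →
    ps.foldl bstep (bv, bc, t)
      = ((ps.filter (fun p => p.2 == M)).headI.1, M,
         (ps.countP (fun p => p.2 == M) : Int)) := by
  induction ps with
  | nil => rcases hmem with ⟨p, hp, _⟩; cases hp
  | cons p tl ih =>
    intro bv bc t hbc
    by_cases he : p.2 = M
    · simp only [List.foldl_cons, bstep, he, if_pos hbc]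
      rw [bfold_flat tl p.1 M 1 (fun w hw => hub w (by simp [hw]))]
      simp [he]
      ring
    · have hlt : p.2 < M := lt_of_le_of_ne (hub p (by simp)) he
      have hmem' : ∃ w ∈ tl, w.2 = M := by
        rcases hmem with ⟨w, hw, hwe⟩
        rcases List.mem_cons.mp hw with h | h
        · exact absurd (h ▸ hwe) he
        · exact ⟨w, h, hwe⟩
      have hub' : ∀ w ∈ tl, w.2 ≤ M := fun w hw => hub w (by simp [hw])
      simp only [List.foldl_cons, bstep]
      by_cases hgt : p.2 > bc
      · rw [if_pos hgt]
        rw [ih hmem' hub' p.1 p.2 1 hlt]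
        simp [he]
      · rw [if_neg hgt]
        by_cases heq : p.2 = bc
        · rw [if_pos heq, ih hmem' hub' bv bc (t+1) hbc]
          simp [he]
        · rw [if_neg heq, ih hmem' hub' bv bc t hbc]
          simp [he]

theorem runs_perm (array : List Int) (h : array ≠ []) :
    ((PySem.List.sorted array (fun x => x) false).foldl rstep []).Perm
      ((PySem.Set.ofList array).map (fun u => (u, (array.count u : Int)))) := by
  have hperm : (PySem.List.sorted array (fun x => x) false).Perm array :=
    PySem.List.sorted_perm ..
  have hws : PySem.List.sorted array (fun x => x) false ≠ [] := by
    intro h0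
    exact h ((PySem.List.sorted_eq_nil_iff ..).mp h0)
  obtain ⟨w0, wtl, hw⟩ := List.exists_cons_of_ne_nil hws
  have hpw : (PySem.List.sorted array (fun x => x) false).Pairwise (· ≤ ·) :=
    PySem.List.sorted_pairwise ..
  rw [hw] at hperm hpw ⊢
  have hlb : ∀ u ∈ wtl, w0 ≤ u := fun u hu => (List.pairwise_cons.mp hpw).1 u hu
  have hstep0 : rstep [] w0 = [] ++ [(w0, 1)] := by simp [rstep]
  rw [List.foldl_cons, hstep0]
  refine (rfold_perm wtl w0 1 [] hpw.of_cons hlb).trans ?_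
  rw [List.nil_append]
  -- counts over array = counts over w0 :: wtl
  have hcarr : ∀ u, (array.count u : Int) = ((w0 :: wtl).count u : Int) := by
    intro u
    have := hperm.count_eq u
    exact_mod_cast congrArg (fun n : Nat => (n : Int)) this.symm
  have hS : (PySem.Set.ofList array).Perm (w0 :: ddm wtl w0) := by
    rw [List.perm_ext_iff_of_nodup (PySem.Set.nodup_ofList ..)
      (List.nodup_cons.mpr ⟨fun h0 => ((mem_ddm ..).mp h0).2 rfl, nodup_ddm ..⟩)]
    intro u
    rw [PySem.Set.mem_ofList, ← hperm.mem_iff]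
    constructor
    · intro hu
      rcases List.mem_cons.mp hu with h0 | h0
      · exact List.mem_cons.mpr (Or.inl h0)
      · by_cases hux : u = w0
        · exact List.mem_cons.mpr (Or.inl hux)
        · exact List.mem_cons.mpr (Or.inr ((mem_ddm ..).mpr ⟨h0, hux⟩))
    · intro hu
      rcases List.mem_cons.mp hu with h0 | h0
      · exact List.mem_cons.mpr (Or.inl h0)
      · exact List.mem_cons.mpr (Or.inr ((mem_ddm ..).mp h0).1)
  refine List.Perm.trans ?_ (hS.map (fun u => (u, (array.count u : Int)))).symm
  rw [List.map_cons]
  have h1 : (w0, (array.count w0 : Int)) = (w0, 1 + (wtl.count w0 : Int)) := by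
    rw [hcarr w0, List.count_cons_self]; push_cast; ring_nf
  rw [h1]
  refine List.Perm.cons _ (List.Perm.of_eq ?_)
  refine (List.map_congr_left ?_).symm
  intro u hu
  rw [hcarr u, List.count_cons, if_neg (by simpa using Ne.symm ((mem_ddm ..).mp hu).2)]
  simp

-- A's counting loop builds exactly Counter(array)
theorem afold_counter (array : List Int) :
    (array.foldl (fun (d : PySem.Dict Int Int) num =>
      if !d.contains num then d.insert num 1
      else d.insert num (d.getD num 0 + 1)) PySem.Dict.empty) = PySem.Dict.counter array := by
  rw [PySem.List.foldl_congr_mem (g := fun (d : PySem.Dict Int Int) num => d.insert num (d.getD num 0 + 1))]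
  · exact PySem.Dict.foldl_insert_getD_add_one_eq_counter array
  · intro d num _
    by_cases hc : d.contains num
    · simp [hc]
    · simp [hc, PySem.Dict.getD_of_not_contains d 0 (by simpa using hc)]

-- ===== VERDICT (by name: the statement is the Claim_ definition above) =====
theorem solution_spec : Claim_equal_solution := by
  intro array _ hpre
  unfold Spec_solution solution solution_alt
  rw [afold_counter array]
  set S := PySem.Set.ofList array with hSdef
  have hSne : S ≠ [] := by
    obtain ⟨a, tl, rfl⟩ := List.exists_cons_of_ne_nil hpre
    intro h
    have : a ∈ S := by rw [hSdef]; exact (PySem.Set.mem_ofList ..).mpr (List.mem_cons_self ..)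
    simp [h] at this
  have hvals : (PySem.Dict.counter array).values = S.map (fun k => (array.count k : Int)) := by
    have h := PySem.Dict.items_counter (xs := array)
    simp only [PySem.Dict.values, h, List.map_map]
    rfl
  have hvne : (PySem.Dict.counter array).values ≠ [] := by
    rw [hvals]; simpa using hSne
  obtain ⟨m, hm⟩ : ∃ m, PySem.List.max? (PySem.Dict.counter array).values (fun x => x) = some m := by
    cases hmx : PySem.List.max? (PySem.Dict.counter array).values (fun x => x) with
    | none => exact absurd ((PySem.List.max?_eq_none_iff _ _).mp hmx) hvne
    | some m => exact ⟨m, rfl⟩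
  have hmmem : m ∈ S.map (fun k => (array.count k : Int)) := hvals ▸ PySem.List.max?_mem hm
  have hub : ∀ y ∈ S.map (fun k => (array.count k : Int)), y ≤ m := by
    intro y hy
    exact PySem.List.max?_isMax hm y (hvals ▸ hy)
  obtain ⟨k0, hk0S, hk0⟩ := List.mem_map.mp hmmem
  dsimp only
  rw [hm]
  simp only [Option.getD_some, PySem.Dict.items_counter, List.filter_map, List.map_map,
    Function.comp_def, List.map_id']
  rw [← hSdef]
  -- B side: the runs list is a permutation of S paired with its counts
  have hruns := runs_perm array hpre
  rw [← hSdef] at hruns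
  set R := (PySem.List.sorted array (fun x => x) false).foldl rstep [] with hRdef
  have hk0arr : k0 ∈ array := by
    rw [hSdef] at hk0S; exact (PySem.Set.mem_ofList ..).mp hk0S
  have hpos : (0 : Int) < m := by
    rw [← hk0]
    exact_mod_cast List.count_pos_iff.mpr hk0arr
  have hmemR : ∃ p ∈ R, p.2 = m := by
    refine ⟨(k0, (array.count k0 : Int)), ?_, hk0⟩
    exact hruns.mem_iff.mpr (List.mem_map_of_mem hk0S)
  have hubR : ∀ p ∈ R, p.2 ≤ m := by
    intro p hp
    obtain ⟨u, huS, rfl⟩ := List.mem_map.mp (hruns.mem_iff.mp hp)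
    exact hub _ (List.mem_map_of_mem huS)
  rw [bfold_mode R m hmemR hubR 0 0 0 hpos]
  have hfR : (R.filter (fun p => p.2 == m)).Perm
      ((S.filter (fun u => (array.count u : Int) == m)).map (fun u => (u, (array.count u : Int)))) := by
    refine (hruns.filter _).trans ?_
    rw [List.filter_map]
    rfl
  have hcp : (R.countP (fun p => p.2 == m))
      = (S.filter (fun u => (array.count u : Int) == m)).length := by
    rw [List.countP_eq_length_filter, hfR.length_eq, List.length_map]
  rcases hL : S.filter (fun u => (array.count u : Int) == m) with _ | ⟨e, L'⟩
  · exact absurd (hL ▸ List.mem_filter.mpr ⟨hk0S, by simp [hk0]⟩) (List.not_mem_nil)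
  rcases L' with _ | ⟨f, rest⟩
  · -- a unique mode: both return it
    have hfe : R.filter (fun p => p.2 == m) = [(e, (array.count e : Int))] := by
      apply List.perm_singleton.mp
      rw [hL] at hfR
      simpa using hfR
    simp only [hcp, hL, hfe]
    norm_num [PySem.List.pyGet?, PySem.List.pyIdx?]
  · -- a tie: both return -1
    simp only [hcp, hL]
    have h2 : ((e :: f :: rest).length : Int) > 1 := by
      simp only [List.length_cons]
      push_cast
      omega
    rw [if_pos h2, if_neg (by simp only [List.length_cons]; push_cast; omega)]
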